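-- pv_equiv track=rewrite | github.com/zamalali/langchain-code | src/langchain_code/cli.py | _diff_todos
-- ===== SOURCE A (Python) =====
-- def _coerce_sequential_todos(todos: list[dict] | None) -> list[dict]:
--     """Ensure visual progression is strictly sequential."""
--     todos = list(todos or [])
--     blocked = False
--     out: list[dict] = []
--     for it in todos:
--         st = (it.get("status") or "pending").lower().replace("-", "_")
--         if blocked and st in {"in_progress", "completed"}:
--             st = "pending"
--         if st != "completed":
--             blocked = True
--         out.append({**it, "status": st})
--     return out
--
-- def _diff_todos(before: list[dict] | None, after: list[dict] | None) -> list[str]: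
--     before = _coerce_sequential_todos(before or [])
--     after = _coerce_sequential_todos(after or [])
--     changes: list[str] = []
--     for i in range(min(len(before), len(after))):
--         b = (before[i].get("status") or "").lower()
--         a = (after[i].get("status") or "").lower()
--         if b != a:
--             content = (after[i].get("content") or before[i].get("content") or "").strip()
--             changes.append(f"[{i+1}] {content} → {a}")
--     if len(after) > len(before):
--         for j in range(len(before), len(after)):
--             content = (after[j].get("content") or "").strip()
--             changes.append(f"[+ ] {content} (added)")
--     if len(before) > len(after):
--         for j in range(len(after), len(before)):
--             content = (before[j].get("content") or "").strip()
--             changes.append(f"[- ] {content} (removed)")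
--     return changes
-- ===== SOURCE B (Python) =====
-- def _coerce_sequential_todos(todos: list[dict] | None) -> list[dict]:
--     """Ensure visual progression is strictly sequential (closed form: every item
--     strictly after the first non-completed one is demoted from in_progress/completed)."""
--     todos = list(todos or [])
--     norm = [(it.get("status") or "pending").lower().replace("-", "_") for it in todos]
--     k = next((i for i, s in enumerate(norm) if s != "completed"), len(norm))
--     keep = [{**it, "status": s} for it, s in zip(todos[:k + 1], norm)]
--     demoted = [{**it, "status": "pending" if s in ("in_progress", "completed") else s}
--                for it, s in zip(todos[k + 1:], norm[k + 1:])]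
--     return keep + demoted
--
-- def _go(b: list[dict], a: list[dict], n: int) -> list[str]:
--     if not b:
--         return [f"[+ ] {(y.get('content') or '').strip()} (added)" for y in a]
--     if not a:
--         return [f"[- ] {(x.get('content') or '').strip()} (removed)" for x in b]
--     x, y = b[0], a[0]
--     rest = _go(b[1:], a[1:], n + 1)
--     b_st = (x.get("status") or "").lower()
--     a_st = (y.get("status") or "").lower()
--     if b_st != a_st:
--         content = (y.get("content") or x.get("content") or "").strip()
--         return [f"[{n}] {content} → {a_st}"] + rest
--     return rest
--
-- def _diff_todos(before: list[dict] | None, after: list[dict] | None) -> list[str]: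
--     return _go(_coerce_sequential_todos(before or []),
--                _coerce_sequential_todos(after or []), 1)
-- ===== Notes on version B (the rewrite author's own statement) =====
-- stated objective: alternative
-- what changed: The stateful blocked-flag loop in _coerce_sequential_todos is replaced by a closed form (find the first non-completed index, keep statuses up to it, demote in_progress/completed after it), and the three index loops of _diff_todos are replaced by one structural recursion that consumes both lists head-by-head and emits the added/removed tail via a map when one side runs out.
import Mathlib
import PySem

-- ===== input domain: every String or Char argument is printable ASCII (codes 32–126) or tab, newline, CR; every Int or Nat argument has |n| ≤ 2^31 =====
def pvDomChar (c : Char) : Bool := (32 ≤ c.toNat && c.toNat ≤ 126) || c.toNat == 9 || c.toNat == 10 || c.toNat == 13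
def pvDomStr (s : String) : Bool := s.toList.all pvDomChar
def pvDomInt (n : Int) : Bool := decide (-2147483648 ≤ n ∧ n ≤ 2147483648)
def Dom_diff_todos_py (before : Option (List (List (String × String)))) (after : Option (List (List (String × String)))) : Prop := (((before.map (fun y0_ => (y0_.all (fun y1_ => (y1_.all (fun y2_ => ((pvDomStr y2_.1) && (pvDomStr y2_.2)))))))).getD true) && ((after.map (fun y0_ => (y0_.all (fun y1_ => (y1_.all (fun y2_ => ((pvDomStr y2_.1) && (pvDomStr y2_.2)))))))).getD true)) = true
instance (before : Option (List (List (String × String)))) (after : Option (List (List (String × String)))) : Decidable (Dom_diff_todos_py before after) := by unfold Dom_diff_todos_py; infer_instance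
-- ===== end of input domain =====

-- B replaces A's stateful blocked-flag loop by a closed form of the coercion (find the first
-- non-completed index, demote in_progress/completed strictly after it) and A's three index
-- loops by one structural recursion over both lists; same return value.

-- Shared helper expressions (textually identical sub-expressions of both Pythons).
-- `(d.get("status") or "").lower()`; a Python dict arrives as an association list, so it is
-- rebuilt with Dict.ofList (duplicate keys: last value wins, exactly like Python's dict(...)).
def pvStat (d : List (String × String)) : String :=
  PySem.Str.lower (((PySem.Dict.ofList d).get? "status").getD "")

-- `(d.get("content") or "").strip()`
def pvCont (d : List (String × String)) : String :=
  PySem.Str.strip (((PySem.Dict.ofList d).get? "content").getD "")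

-- `(y.get("content") or x.get("content") or "").strip()`
def pvContAB (y x : List (String × String)) : String :=
  PySem.Str.strip
    (if ((PySem.Dict.ofList y).get? "content").getD "" ≠ ""
     then ((PySem.Dict.ofList y).get? "content").getD ""
     else ((PySem.Dict.ofList x).get? "content").getD "")

def pvLineN (n : Int) (x y : List (String × String)) : String :=
  "[" ++ PySem.Int.toStr n ++ "] " ++ pvContAB y x ++ " → " ++ pvStat y

def pvMidLine (i : Int) (x y : List (String × String)) : String := pvLineN (i + 1) x y

def pvAddLine (y : List (String × String)) : String := "[+ ] " ++ pvCont y ++ " (added)"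

def pvRemLine (x : List (String × String)) : String := "[- ] " ++ pvCont x ++ " (removed)"

-- `{**it, "status": s}`
def pvWithStatus (it : List (String × String)) (s : String) : List (String × String) :=
  ((PySem.Dict.ofList it).insert "status" s).items

-- `(it.get("status") or "pending").lower().replace("-", "_")`
def pvNormStat (it : List (String × String)) : String :=
  let s0 := ((PySem.Dict.ofList it).get? "status").getD ""
  PySem.Str.replace (PySem.Str.lower (if s0 = "" then "pending" else s0)) "-" "_"

-- ===== PORT A =====
-- A's _coerce_sequential_todos, verbatim; state = (blocked, out)
def coerce_todos (todos : List (List (String × String))) : List (List (String × String)) :=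
  (todos.foldl (fun (st : Bool × List (List (String × String))) it =>
      let s1 := pvNormStat it
      let s2 := if st.1 && (s1 = "in_progress" || s1 = "completed") then "pending" else s1
      ((if s2 ≠ "completed" then true else st.1), st.2 ++ [pvWithStatus it s2]))
    (false, [])).2

def diff_todos_py (before : Option (List (List (String × String)))) (after : Option (List (List (String × String)))) : List String :=
  let bef := coerce_todos (before.getD [])
  let aft := coerce_todos (after.getD [])
  let changes := (PySem.List.pyRange 0 (min (bef.length : Int) (aft.length : Int)) 1).foldl
    (fun acc i =>
      if pvStat (PySem.List.pyGetD bef i []) ≠ pvStat (PySem.List.pyGetD aft i [])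
      then acc ++ [pvMidLine i (PySem.List.pyGetD bef i []) (PySem.List.pyGetD aft i [])]
      else acc) []
  let changes := if (aft.length : Int) > (bef.length : Int) then
      (PySem.List.pyRange (bef.length : Int) (aft.length : Int) 1).foldl
        (fun acc j => acc ++ [pvAddLine (PySem.List.pyGetD aft j [])]) changes
    else changes
  let changes := if (bef.length : Int) > (aft.length : Int) then
      (PySem.List.pyRange (aft.length : Int) (bef.length : Int) 1).foldl
        (fun acc j => acc ++ [pvRemLine (PySem.List.pyGetD bef j [])]) changes
    else changes
  changes

-- ===== PORT B =====
-- `"pending" if s in ("in_progress", "completed") else s`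
def pvDemote (s : String) : String :=
  if s = "in_progress" || s = "completed" then "pending" else s

-- `next((i for i, s in enumerate(norm) if s != "completed"), len(norm))`
def pvFirstNotCompleted : List String → Nat
  | [] => 0
  | s :: t => if s ≠ "completed" then 0 else pvFirstNotCompleted t + 1

-- B's closed-form _coerce_sequential_todos
def coerce_todos_alt (todos : List (List (String × String))) : List (List (String × String)) :=
  let norm := todos.map pvNormStat
  let k := pvFirstNotCompleted norm
  ((todos.take (k + 1)).zip norm).map (fun p => pvWithStatus p.1 p.2)
  ++ ((todos.drop (k + 1)).zip (norm.drop (k + 1))).map (fun p => pvWithStatus p.1 (pvDemote p.2))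

-- B's _go: structural recursion over both lists, n is the printed 1-based index
def pvGo : List (List (String × String)) → List (List (String × String)) → Int → List String
  | [], a, _ => a.map pvAddLine
  | x :: bt, [], _ => (x :: bt).map pvRemLine
  | x :: bt, y :: at', n =>
      let rest := pvGo bt at' (n + 1)
      if pvStat x ≠ pvStat y then pvLineN n x y :: rest else rest

def diff_todos_py_alt (before : Option (List (List (String × String)))) (after : Option (List (List (String × String)))) : List String :=
  pvGo (coerce_todos_alt (before.getD [])) (coerce_todos_alt (after.getD [])) 1

-- ===== PRECONDITION & SPEC =====
def Spec_diff_todos_py (before : Option (List (List (String × String)))) (after : Option (List (List (String × String)))) (out : List String) : Prop := out = diff_todos_py_alt before after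
instance (before : Option (List (List (String × String)))) (after : Option (List (List (String × String)))) (out : List String) : Decidable (Spec_diff_todos_py before after out) := by unfold Spec_diff_todos_py; infer_instance

-- ===== CLAIM (what is proved, stated in full; the proofs are below) =====
def Claim_equal_diff_todos_py : Prop := ∀ (before : Option (List (List (String × String)))) (after : Option (List (List (String × String)))), Dom_diff_todos_py before after → Spec_diff_todos_py before after (diff_todos_py before after)

-- ===== LEMMAS AND PROOFS =====

-- common normal form both ports are reduced to
def pvBody (b a : List (List (String × String))) (k : Nat) : List String :=
  if pvStat (b.getD k []) ≠ pvStat (a.getD k [])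
  then [pvMidLine (k : Int) (b.getD k []) (a.getD k [])] else []

def pvNorm (b a : List (List (String × String))) : List String :=
  (List.range (min b.length a.length)).flatMap (pvBody b a)
  ++ (a.drop b.length).map pvAddLine
  ++ (b.drop a.length).map pvRemLine

-- recursive renderings of A's coercion loop: blocked = true / blocked = false
def pvCoT : List (List (String × String)) → List (List (String × String))
  | [] => []
  | it :: t => pvWithStatus it (pvDemote (pvNormStat it)) :: pvCoT t

def pvCoF : List (List (String × String)) → List (List (String × String))
  | [] => []
  | it :: t =>
      if pvNormStat it = "completed" then pvWithStatus it (pvNormStat it) :: pvCoF t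
      else pvWithStatus it (pvNormStat it) :: pvCoT t

theorem pv_foldl_ite {α β : Type} (l : List α) (p : α → Prop) [DecidablePred p]
    (f : α → β) (acc : List β) :
    l.foldl (fun acc x => if p x then acc ++ [f x] else acc) acc
      = acc ++ l.flatMap (fun x => if p x then [f x] else []) := by
  induction l generalizing acc with
  | nil => simp
  | cons h t ih => by_cases hp : p h <;> simp [hp, ih, List.append_assoc]

theorem pv_flatMap_congr {α β : Type} {l : List α} {f g : α → List β}
    (h : ∀ x ∈ l, f x = g x) : l.flatMap f = l.flatMap g := by
  induction l with
  | nil => rfl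
  | cons x t ih =>
    simp only [List.flatMap_cons, h x (List.mem_cons_self), ih (fun y hy => h y (List.mem_cons_of_mem _ hy))]

-- A's coercion fold, unrolled to the recursive renderings
theorem pv_coerce_fold (todos : List (List (String × String)))
    (bl : Bool) (out : List (List (String × String))) :
    (todos.foldl (fun (st : Bool × List (List (String × String))) it =>
        let s1 := pvNormStat it
        let s2 := if st.1 && (s1 = "in_progress" || s1 = "completed") then "pending" else s1
        ((if s2 ≠ "completed" then true else st.1), st.2 ++ [pvWithStatus it s2]))
      (bl, out)).2
    = out ++ (if bl then pvCoT todos else pvCoF todos) := by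
  induction todos generalizing bl out with
  | nil => cases bl <;> simp [pvCoT, pvCoF]
  | cons it t ih =>
    cases bl with
    | true =>
      have h2 : (if true && (pvNormStat it = "in_progress" || pvNormStat it = "completed")
          then "pending" else pvNormStat it) = pvDemote (pvNormStat it) := by
        simp [pvDemote]
      simp only [List.foldl_cons, h2]
      have hbl : (if pvDemote (pvNormStat it) ≠ "completed" then true else true) = true := by
        split <;> rfl
      rw [hbl, ih]
      simp [pvCoT]
    | false =>
      have h2 : (if false && (pvNormStat it = "in_progress" || pvNormStat it = "completed")
          then "pending" else pvNormStat it) = pvNormStat it := by simp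
      simp only [List.foldl_cons, h2]
      by_cases hc : pvNormStat it = "completed"
      · rw [if_neg (by simp [hc]), ih]
        simp [pvCoF, hc]
      · rw [if_pos hc, ih]
        simp [pvCoF, hc]

theorem pv_coerce_A (todos : List (List (String × String))) :
    coerce_todos todos = pvCoF todos := by
  unfold coerce_todos
  rw [pv_coerce_fold]
  simp

-- demotion pass = pvCoT
theorem pv_demote_zip (t : List (List (String × String))) :
    ((t.zip (t.map pvNormStat)).map (fun p => pvWithStatus p.1 (pvDemote p.2))) = pvCoT t := by
  induction t with
  | nil => rfl
  | cons it r ih => simp [pvCoT, ih]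

theorem pv_coerce_B (todos : List (List (String × String))) :
    coerce_todos_alt todos = pvCoF todos := by
  induction todos with
  | nil => rfl
  | cons it t ih =>
    simp only [coerce_todos_alt, List.map_cons] at ih ⊢
    by_cases hc : pvNormStat it = "completed"
    · rw [show pvFirstNotCompleted (pvNormStat it :: t.map pvNormStat)
          = pvFirstNotCompleted (t.map pvNormStat) + 1 from by simp [pvFirstNotCompleted, hc]]
      simp only [List.take_succ_cons, List.drop_succ_cons, List.zip_cons_cons, List.map_cons,
        List.cons_append]
      rw [ih]
      simp [pvCoF, hc]
    · rw [show pvFirstNotCompleted (pvNormStat it :: t.map pvNormStat) = 0 from by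
          simp [pvFirstNotCompleted, hc]]
      simp only [zero_add, List.take_succ_cons, List.take_zero, List.drop_succ_cons,
        List.drop_zero, List.zip_cons_cons, List.zip_nil_left, List.map_cons, List.map_nil,
        List.cons_append, List.nil_append]
      rw [pv_demote_zip]
      simp [pvCoF, hc]

-- A reduced to the normal form
theorem pv_A_norm (before after : Option (List (List (String × String)))) :
    diff_todos_py before after
      = pvNorm (coerce_todos (before.getD [])) (coerce_todos (after.getD [])) := by
  simp only [diff_todos_py, pvNorm]
  set b := coerce_todos (before.getD []) with hb
  set a := coerce_todos (after.getD []) with ha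
  rw [pv_foldl_ite (p := fun i => pvStat (PySem.List.pyGetD b i []) ≠ pvStat (PySem.List.pyGetD a i []))
        (f := fun i => pvMidLine i (PySem.List.pyGetD b i []) (PySem.List.pyGetD a i []))]
  have hmin : (min (b.length : Int) (a.length : Int)) = ((min b.length a.length : Nat) : Int) := by
    push_cast; rfl
  rw [hmin, PySem.List.pyRange_zero_nat, List.flatMap_map]
  simp only [PySem.List.pyGetD_natCast, List.nil_append]
  have hmid : (List.range (min b.length a.length)).flatMap
      (fun k => if pvStat (b.getD k []) ≠ pvStat (a.getD k [])
        then [pvMidLine (k : Int) (b.getD k []) (a.getD k [])] else [])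
      = (List.range (min b.length a.length)).flatMap (pvBody b a) := by
    exact pv_flatMap_congr (fun k _ => by simp [pvBody])
  rw [hmid]
  by_cases h1 : (a.length : Int) > (b.length : Int)
  · have hba : b.length ≤ a.length := by exact_mod_cast le_of_lt h1
    rw [if_pos h1,
        PySem.List.foldl_append_singleton_eq_map (f := fun j => pvAddLine (PySem.List.pyGetD a j []))]
    have : (PySem.List.pyRange (b.length : Int) (a.length : Int) 1).map
        (fun j => pvAddLine (PySem.List.pyGetD a j []))
        = (a.drop b.length).map pvAddLine := by
      rw [show (fun j => pvAddLine (PySem.List.pyGetD a j [])) =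
            pvAddLine ∘ (fun j => PySem.List.pyGetD a j []) from rfl, ← List.map_map,
          PySem.List.map_pyGetD_pyRange' a [] (a := (b.length : Int)) (by positivity)]
      simp
    rw [this, if_neg (by omega)]
    have : b.drop a.length = [] := List.drop_eq_nil_of_le hba
    simp [this]
  · have hab : a.length ≤ b.length := by
      have := not_lt.mp h1; exact_mod_cast this
    rw [if_neg h1]
    have hanil : a.drop b.length = [] := List.drop_eq_nil_of_le hab
    by_cases h2 : (b.length : Int) > (a.length : Int)
    · rw [if_pos h2,
          PySem.List.foldl_append_singleton_eq_map (f := fun j => pvRemLine (PySem.List.pyGetD b j []))]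
      have : (PySem.List.pyRange (a.length : Int) (b.length : Int) 1).map
          (fun j => pvRemLine (PySem.List.pyGetD b j []))
          = (b.drop a.length).map pvRemLine := by
        rw [show (fun j => pvRemLine (PySem.List.pyGetD b j [])) =
              pvRemLine ∘ (fun j => PySem.List.pyGetD b j []) from rfl, ← List.map_map,
            PySem.List.map_pyGetD_pyRange' b [] (a := (a.length : Int)) (by positivity)]
        simp
      rw [this]
      simp [hanil]
    · have hba2 : b.length ≤ a.length := by
        have := not_lt.mp h2; exact_mod_cast this
      rw [if_neg h2]
      have : b.drop a.length = [] := List.drop_eq_nil_of_le hba2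
      simp [hanil, this]

-- B's recursion produces the normal form, shifted by an arbitrary offset
theorem pv_go_norm (b : List (List (String × String))) :
    ∀ (a : List (List (String × String))) (i : Int),
    pvGo b a (i + 1)
      = (List.range (min b.length a.length)).flatMap
          (fun k => if pvStat (b.getD k []) ≠ pvStat (a.getD k [])
            then [pvLineN (i + k + 1) (b.getD k []) (a.getD k [])] else [])
        ++ (a.drop b.length).map pvAddLine
        ++ (b.drop a.length).map pvRemLine := by
  induction b with
  | nil => intro a i; simp [pvGo]
  | cons x bt ih =>
    intro a i
    cases a with
    | nil => simp [pvGo]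
    | cons y at' =>
      have hrec : pvGo bt at' ((i + 1) + 1)
          = (List.range (min bt.length at'.length)).flatMap
              (fun k => if pvStat (bt.getD k []) ≠ pvStat (at'.getD k [])
                then [pvLineN ((i + 1) + k + 1) (bt.getD k []) (at'.getD k [])] else [])
            ++ (at'.drop bt.length).map pvAddLine
            ++ (bt.drop at'.length).map pvRemLine := ih at' (i + 1)
      have hmin : min (x :: bt).length (y :: at').length = min bt.length at'.length + 1 := by
        simp [Nat.succ_min_succ]
      rw [show pvGo (x :: bt) (y :: at') (i + 1)
            = (if pvStat x ≠ pvStat y then [pvLineN (i + 1) x y] else [])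
              ++ pvGo bt at' (i + 1 + 1) from by
          simp only [pvGo]; split <;> simp,
        hrec, hmin, List.range_succ_eq_map, List.flatMap_cons, List.flatMap_map]
      have hcg : (List.range (min bt.length at'.length)).flatMap
          (fun k => if pvStat ((x :: bt).getD (k + 1) []) ≠ pvStat ((y :: at').getD (k + 1) [])
            then [pvLineN (i + ((k : Nat) + 1 : Nat) + 1) ((x :: bt).getD (k + 1) []) ((y :: at').getD (k + 1) [])] else [])
          = (List.range (min bt.length at'.length)).flatMap
          (fun k => if pvStat (bt.getD k []) ≠ pvStat (at'.getD k [])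
            then [pvLineN ((i + 1) + k + 1) (bt.getD k []) (at'.getD k [])] else []) := by
        apply pv_flatMap_congr
        intro k _
        have hidx : (i + ((k : Nat) + 1 : Nat) : Int) + 1 = (i + 1) + (k : Nat) + 1 := by
          push_cast; ring
        simp only [List.getD_cons_succ, hidx]
      rw [hcg]
      simp [List.append_assoc]

-- ===== VERDICT (by name: the statement is the Claim_ definition above) =====
theorem diff_todos_py_spec : Claim_equal_diff_todos_py := by
  intro before after _
  unfold Spec_diff_todos_py diff_todos_py_alt
  rw [pv_A_norm, pv_coerce_B, pv_coerce_B, pv_coerce_A, pv_coerce_A]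
  have hgo := pv_go_norm (pvCoF (before.getD [])) (pvCoF (after.getD [])) 0
  norm_num at hgo
  rw [hgo]
  simp only [pvNorm, List.append_assoc]
  congr 1
  · exact pv_flatMap_congr (fun k _ => by
    by_cases h : pvStat ((pvCoF (before.getD []))[k]?.getD [])
        = pvStat ((pvCoF (after.getD []))[k]?.getD []) <;>
      simp [pvBody, pvMidLine, List.getD_eq_getElem?_getD, h])
  · simp [List.map_drop]
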